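-- pv_equiv track=rewrite | github.com/andreimaximov/algorithms | lib/python/manachers/manachers.py | manachers
-- ===== SOURCE A (Python) =====
-- def manachers(S):
--     """Runs Manachers algorithm on string S.
--
--     Returns an array P where P[i] is the length of the longest substring
--     mirrored around i in S. Strictly, S[i - P[i] + 1:i] == S[i + 1:i + P[i]].
--     """
--     n = len(S)
--
--     assert n > 0
--
--     P = [1] * n
--
--     # Center of the "current" palindrome. This is the palindrome with the
--     # furthest reach to the right. (Part of string we haven't calculated P for
--     # yet)
--     center = 0
--
--     for i in range(1, n):
--         if i < center + P[center]:
--             # Mirror of i around center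
--             k = center - (i - center)
--
--             # Estimate a lower bound on P[i]. This is min(P[k], l) where
--             # l = center - radius - k + 1. This is the distance from k to the
--             # left bound of the "current palindrome". Beyond this bound the
--             # the characters may not match on the left and right side so we
--             # need to explore further.
--             P[i] = min(P[k], k - (center - P[center]))
--
--         while i - P[i] >= 0 and i + P[i] < n and \
--                 S[i - P[i]] == S[i + P[i]]:
--                 P[i] += 1
--
--         if i + P[i] > center + P[center]:
--             center = i
--
--     return P
-- ===== SOURCE B (Python) =====
-- def manachers(S):
--     """Naive expand-around-center: same radius array, plain O(n^2) loops."""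
--     n = len(S)
--     assert n > 0
--     return [_radius(S, i, n) for i in range(n)]
--
--
-- def _radius(S, i, n):
--     p = 1
--     while p <= i and i + p < n and S[i - p] == S[i + p]:
--         p += 1
--     return p
-- ===== Notes on version B (the rewrite author's own statement) =====
-- stated objective: simpler
-- what changed: Replaces Manacher's center/mirror bookkeeping with a plain expand-around-center scan per index (a list comprehension over a simple while-loop helper), computing the same radius array.
import Mathlib
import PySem

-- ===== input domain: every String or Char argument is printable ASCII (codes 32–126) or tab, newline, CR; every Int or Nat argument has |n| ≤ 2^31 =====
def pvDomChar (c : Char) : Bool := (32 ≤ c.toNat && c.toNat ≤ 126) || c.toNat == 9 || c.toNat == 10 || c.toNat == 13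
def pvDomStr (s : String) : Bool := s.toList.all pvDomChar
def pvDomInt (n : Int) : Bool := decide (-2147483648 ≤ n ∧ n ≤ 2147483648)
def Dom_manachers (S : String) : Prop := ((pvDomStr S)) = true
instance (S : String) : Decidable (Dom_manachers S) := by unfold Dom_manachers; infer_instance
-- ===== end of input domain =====

-- B replaces Manacher's center/mirror bookkeeping by a plain expand-around-center
-- scan per index (simpler); both raise on the empty string (assert), excluded by Pre_.
-- ===== PORT A =====
-- the while-loop of A: grow P[i] while characters match; the loop adds 1 to p only
-- while i + p < n, so fuel = s.length can never run out (string accesses are guarded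
-- by the bounds conjuncts, so getD is exact here)
def pvGrowA (s : List Char) (i : Nat) : Nat → Int → Int
  | 0, p => p
  | fuel + 1, p =>
    if 0 ≤ (i : Int) - p ∧ (i : Int) + p < (s.length : Int) ∧
        s.getD ((i : Int) - p).toNat ' ' = s.getD ((i : Int) + p).toNat ' ' then
      pvGrowA s i fuel (p + 1)
    else p

-- one iteration of A's for-loop, state (P, center)
def pvStepA (s : List Char) (st : List Int × Nat) (i : Nat) : List Int × Nat :=
  let P := st.1
  let center := st.2
  let p0 : Int :=
    if (i : Int) < (center : Int) + P.getD center 0 then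
      -- mirror of i around center
      let k : Nat := center - (i - center)
      min (P.getD k 0) ((k : Int) - ((center : Int) - P.getD center 0))
    else P.getD i 0
  let p := pvGrowA s i s.length p0
  let P' := P.set i p
  let center' := if (i : Int) + p > (center : Int) + P'.getD center 0 then i else center
  (P', center')

def manachers (S : String) : List Int :=
  let s := S.toList
  let n := s.length
  ((List.range' 1 (n - 1)).foldl (pvStepA s) (List.replicate n (1 : Int), 0)).1

-- ===== PORT B =====
-- _radius: p = 1; while p <= i and i + p < n and S[i-p] == S[i+p]: p += 1
-- (p grows only while i + p < n, so fuel = s.length suffices; accesses guarded, getD exact)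
def pvRadius (s : List Char) (i : Nat) : Nat → Nat → Nat
  | 0, p => p
  | fuel + 1, p =>
    if p ≤ i ∧ i + p < s.length ∧ s.getD (i - p) ' ' = s.getD (i + p) ' ' then
      pvRadius s i fuel (p + 1)
    else p

def manachers_alt (S : String) : List Int :=
  let s := S.toList
  (List.range s.length).map (fun i => ((pvRadius s i s.length 1 : Nat) : Int))

-- ===== PRECONDITION & SPEC =====
-- A asserts n > 0 (AssertionError on the empty string); B keeps the same assert.
def Pre_manachers (S : String) : Prop := S ≠ ""
instance (S : String) : Decidable (Pre_manachers S) := by unfold Pre_manachers; infer_instance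
def pvWitness_manachers : String := "abacab"

def Spec_manachers (S : String) (out : List Int) : Prop := out = manachers_alt S
instance (S : String) (out : List Int) : Decidable (Spec_manachers S out) := by unfold Spec_manachers; infer_instance

-- ===== CLAIM (what is proved, stated in full; the proofs are below) =====
def Claim_equal_manachers : Prop := ∀ (S : String), Dom_manachers S → Pre_manachers S → Spec_manachers S (manachers S)

-- ===== LEMMAS AND PROOFS =====

-- the expand condition at radius q around center i
def pvC (s : List Char) (i q : Nat) : Prop :=
  q ≤ i ∧ i + q < s.length ∧ s.getD (i - q) ' ' = s.getD (i + q) ' '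

-- R is THE palindromic radius at i: the least q ≥ 1 whose expansion fails
def pvIsRad (s : List Char) (i R : Nat) : Prop :=
  1 ≤ R ∧ (∀ q, 1 ≤ q → q < R → pvC s i q) ∧ ¬ pvC s i R

theorem pvRadius_isRad (s : List Char) (i : Nat) :
    ∀ fuel p, s.length ≤ i + p + fuel → 1 ≤ p →
      (∀ q, 1 ≤ q → q < p → pvC s i q) → pvIsRad s i (pvRadius s i fuel p) := by
  intro fuel
  induction fuel with
  | zero =>
    intro p hf hp hbelow
    refine ⟨hp, hbelow, ?_⟩
    rintro ⟨-, h2, -⟩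
    simp only [pvRadius] at h2
    omega
  | succ fuel ih =>
    intro p hf hp hbelow
    rw [pvRadius]
    split_ifs with hc
    · exact ih (p + 1) (by omega) (by omega)
        (fun q hq1 hq2 => by
          rcases Nat.lt_or_ge q p with h | h
          · exact hbelow q hq1 h
          · have : q = p := by omega
            rwa [this])
    · exact ⟨hp, hbelow, hc⟩

theorem pvRadius_rad (s : List Char) (i : Nat) :
    pvIsRad s i (pvRadius s i s.length 1) :=
  pvRadius_isRad s i s.length 1 (by omega) (le_refl 1) (by omega)

theorem pvLeRad (s : List Char) (i e R : Nat) (hR : pvIsRad s i R)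
    (h : ∀ q, 1 ≤ q → q < e → pvC s i q) : e ≤ R := by
  by_contra hc
  exact hR.2.2 (h R hR.1 (by omega))

theorem pvRadLe (s : List Char) (i R : Nat) (hR : pvIsRad s i R) : R ≤ i + 1 := by
  by_contra hc
  have := hR.2.1 (i + 1) (by omega) (by omega)
  exact absurd this.1 (by omega)

theorem pvRadius_zero (s : List Char) (fuel : Nat) : pvRadius s 0 fuel 1 = 1 := by
  cases fuel with
  | zero => rfl
  | succ fuel => rw [pvRadius]; simp

-- A's while loop lands exactly on the radius from any sound positive lower bound
theorem pvGrowA_rad (s : List Char) (i R : Nat) (hR : pvIsRad s i R) :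
    ∀ fuel (p : Int), 1 ≤ p → p ≤ (R : Int) → s.length ≤ i + p.toNat + fuel →
      pvGrowA s i fuel p = (R : Int) := by
  intro fuel
  induction fuel with
  | zero =>
    intro p hp1 hpR hf
    rcases Int.lt_or_le p R with h | h
    · have hc := hR.2.1 p.toNat (by omega) (by omega)
      exact absurd hc.2.1 (by omega)
    · simp only [pvGrowA]; omega
  | succ fuel ih =>
    intro p hp1 hpR hf
    rw [pvGrowA]
    have e1 : ((i : Int) - p).toNat = i - p.toNat := by omega
    have e2 : ((i : Int) + p).toNat = i + p.toNat := by omega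
    split_ifs with hc
    · obtain ⟨hc1, hc2, hc3⟩ := hc
      rcases Int.lt_or_le p R with h | h
      · exact ih (p + 1) (by omega) (by omega) (by omega)
      · -- p = R: the loop condition would contradict ¬ pvC R
        rw [e1, e2] at hc3
        refine absurd (?_ : pvC s i R) hR.2.2
        have hpe : p.toNat = R := by omega
        rw [hpe] at hc3
        exact ⟨by omega, by omega, hc3⟩
    · rcases Int.lt_or_le p R with h | h
      · obtain ⟨hq1, hq2, hq3⟩ := hR.2.1 p.toNat (by omega) (by omega)
        refine absurd ⟨by omega, by omega, ?_⟩ hc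
        rw [e1, e2]
        exact hq3
      · omega

-- the heart of Manacher's correctness: the mirrored lower bound is sound
theorem pvMirror (s : List Char) (c i Rc Rk Ri : Nat) (hci : c < i) (hi : i ≤ 2 * c)
    (hRc : pvIsRad s c Rc) (hRk : pvIsRad s (2 * c - i) Rk) (hRi : pvIsRad s i Ri)
    (hbr : (i : Int) < (c : Int) + (Rc : Int)) :
    min ((Rk : Nat) : Int) (((2 * c - i : Nat) : Int) - ((c : Int) - (Rc : Int)))
      ≤ ((Ri : Nat) : Int) := by
  set k := 2 * c - i with hk
  have hbrN : i < c + Rc := by omega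
  have hRk1 : 1 ≤ Rk := hRk.1
  have hkRc : c + 1 ≤ k + Rc := by omega
  set e := min Rk (k + Rc - c) with he
  have hee : min ((Rk : Nat) : Int) (((k : Nat) : Int) - ((c : Int) - (Rc : Int))) = (e : Int) := by
    omega
  rw [hee]
  have hmain : e ≤ Ri := by
    apply pvLeRad s i e Ri hRi
    intro q hq1 hq2
    have hqk : q < Rk := by omega
    set t1 := i - c + q with ht1e
    have ht1 : t1 < Rc := by omega
    obtain ⟨hqk1, hqk2, hqk3⟩ : pvC s k q := hRk.2.1 q hq1 hqk
    obtain ⟨h11, h12, h13⟩ : pvC s c t1 := hRc.2.1 t1 (by omega) ht1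
    refine ⟨by omega, by rw [show i + q = c + t1 by omega]; exact h12, ?_⟩
    have hr : s.getD (i + q) ' ' = s.getD (k + q) ' ' := by
      rw [show i + q = c + t1 by omega, ← h13, show c - t1 = k - q by omega, hqk3]
    rw [hr]
    rcases lt_trichotomy q (i - c) with hlt | heq | hgt
    · set t2 := (i - c) - q with ht2e
      obtain ⟨h21, h22, h23⟩ : pvC s c t2 := hRc.2.1 t2 (by omega) (by omega)
      rw [show i - q = c + t2 by omega, show k + q = c - t2 by omega]
      exact h23.symm
    · rw [show i - q = c by omega, show k + q = c by omega]
    · set t2 := q - (i - c) with ht2e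
      obtain ⟨h21, h22, h23⟩ : pvC s c t2 := hRc.2.1 t2 (by omega) (by omega)
      rw [show i - q = c - t2 by omega, show k + q = c + t2 by omega]
      exact h23
  omega

theorem pvGetD_set_self (l : List Int) (a : Nat) (v : Int) (h : a < l.length) :
    (l.set a v).getD a 0 = v := by
  simp [List.getD_eq_getElem?_getD, h]

theorem pvGetD_set_ne (l : List Int) (a j : Nat) (v : Int) (h : j ≠ a) :
    (l.set a v).getD j 0 = l.getD j 0 := by
  simp [List.getD_eq_getElem?_getD, List.getElem?_set_ne, Ne.symm h]

theorem pvLoop (s : List Char) (hn : 0 < s.length) :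
    ∀ m, m ≤ s.length - 1 →
    ((List.range' 1 m).foldl (pvStepA s) (List.replicate s.length (1 : Int), 0)).1.length = s.length ∧
    ((List.range' 1 m).foldl (pvStepA s) (List.replicate s.length (1 : Int), 0)).2 ≤ m ∧
      ∀ j, j < s.length →
        ((List.range' 1 m).foldl (pvStepA s) (List.replicate s.length (1 : Int), 0)).1.getD j 0 =
          if j ≤ m then (pvRadius s j s.length 1 : Int) else 1 := by
  intro m
  induction m with
  | zero =>
    intro _
    refine ⟨by simp, by simp, ?_⟩
    intro j hj
    simp only [List.range', List.foldl]
    rw [List.getD_eq_getElem?_getD, List.getElem?_replicate]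
    simp only [hj, if_true]
    rcases Nat.eq_zero_or_pos j with rfl | hj0
    · simp [pvRadius_zero]
    · simp [Nat.not_le.mpr hj0]
  | succ m ih =>
    intro hm
    obtain ⟨hlen, hcm, hP⟩ := ih (by omega)
    set st := (List.range' 1 m).foldl (pvStepA s) (List.replicate s.length (1 : Int), 0) with hst
    have hconcat : List.range' 1 (m + 1) = List.range' 1 m ++ [1 + m] := by
      rw [List.range'_concat]; simp
    rw [hconcat, List.foldl_append]
    simp only [List.foldl]
    rw [← hst, show 1 + m = m + 1 by omega]
    set i := m + 1 with hi
    set c := st.2 with hc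
    have hcn : c < s.length := by omega
    have hPc : st.1.getD c 0 = (pvRadius s c s.length 1 : Int) := by
      rw [hP c hcn]; simp [hcm]
    have hin : i < s.length := by omega
    have hRi := pvRadius_rad s i
    rw [pvStepA]
    simp only []
    set p0 : Int :=
      (if (i : Int) < (c : Int) + st.1.getD c 0 then
        min (st.1.getD (c - (i - c)) 0) (((c - (i - c) : Nat) : Int) - ((c : Int) - st.1.getD c 0))
      else st.1.getD i 0) with hp0
    have hp0good : 1 ≤ p0 ∧ p0 ≤ ((pvRadius s i s.length 1 : Nat) : Int) := by
      rw [hp0]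
      split_ifs with hb
      · rw [hPc] at hb
        have hRc := pvRadius_rad s c
        have hRcle : pvRadius s c s.length 1 ≤ c + 1 := pvRadLe s c _ hRc
        have hci : c < i := by omega
        have hi2c : i ≤ 2 * c := by omega
        have hkk : c - (i - c) = 2 * c - i := by omega
        have hPk : st.1.getD (2 * c - i) 0 = (pvRadius s (2 * c - i) s.length 1 : Int) := by
          rw [hP (2 * c - i) (by omega)]
          simp [show 2 * c - i ≤ m by omega]
        rw [hkk, hPk, hPc]
        have hRk := pvRadius_rad s (2 * c - i)
        refine ⟨by have := hRk.1; omega, pvMirror s c i _ _ _ hci hi2c hRc hRk hRi hb⟩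
      · rw [hP i hin]
        simp only [show ¬ i ≤ m by omega, if_false]
        have := hRi.1
        exact ⟨le_refl 1, by omega⟩
    have hpeq : pvGrowA s i s.length p0 = ((pvRadius s i s.length 1 : Nat) : Int) :=
      pvGrowA_rad s i _ hRi s.length p0 hp0good.1 hp0good.2 (by omega)
    rw [hpeq]
    refine ⟨by simp [hlen], ?_, ?_⟩
    · split_ifs <;> omega
    · intro j hj
      rcases eq_or_ne j i with rfl | hne
      · rw [pvGetD_set_self _ _ _ (by omega)]
        simp
      · rw [pvGetD_set_ne _ _ _ _ hne, hP j hj]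
        have : (j ≤ m) ↔ (j ≤ i) := by omega
        simp [this]

-- ===== VERDICT (by name: the statement is the Claim_ definition above) =====
theorem manachers_spec : Claim_equal_manachers := by
  intro S _ hpre
  unfold Spec_manachers manachers manachers_alt
  unfold Pre_manachers at hpre
  have hn : 0 < S.toList.length := by
    rcases Nat.eq_zero_or_pos S.toList.length with h0 | h0
    · exact absurd (by simpa using congrArg String.ofList (List.length_eq_zero_iff.mp h0)) hpre
    · exact h0
  set s := S.toList with hs
  obtain ⟨hlen, -, hP⟩ := pvLoop s hn (s.length - 1) (le_refl _)
  apply List.ext_getElem (by simp [hlen])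
  intro j h1 h2
  have hjn : j < s.length := by simpa [hlen] using h1
  have := hP j hjn
  rw [List.getD_eq_getElem _ _ (by omega)] at this
  simp only [List.getElem_map, List.getElem_range]
  rw [this, if_pos (by omega)]
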